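-- pv_equiv track=rewrite | github.com/MatiasLoiseau/PREDUN | utils/remove_empty_rows.py | is_empty_row
-- ===== SOURCE A (Python) =====
-- from typing import Iterable
--
-- def is_empty_row(row: Iterable[str]) -> bool:
--     """Devuelve True si todas las celdas de la fila están vacías (después de strip)."""
--     # row puede ser una lista vacía (línea en blanco) o lista de strings
--     if not row:
--         return True
--     for cell in row:
--         if cell is None:
--             continue
--         if str(cell).strip() != "":
--             return False
--     return True
-- ===== SOURCE B (Python) =====
-- def is_empty_row(row) -> bool:
--     """True iff every cell is empty after strip: join all non-None cells and strip once."""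
--     return "".join(str(c) for c in row if c is not None).strip() == ""
-- ===== Notes on version B (the rewrite author's own statement) =====
-- stated objective: idiomatic
-- what changed: Replaces the per-cell strip-and-early-exit loop by concatenating all cells into one string and performing a single strip test (all cells are whitespace-only iff their concatenation is).
import Mathlib
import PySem

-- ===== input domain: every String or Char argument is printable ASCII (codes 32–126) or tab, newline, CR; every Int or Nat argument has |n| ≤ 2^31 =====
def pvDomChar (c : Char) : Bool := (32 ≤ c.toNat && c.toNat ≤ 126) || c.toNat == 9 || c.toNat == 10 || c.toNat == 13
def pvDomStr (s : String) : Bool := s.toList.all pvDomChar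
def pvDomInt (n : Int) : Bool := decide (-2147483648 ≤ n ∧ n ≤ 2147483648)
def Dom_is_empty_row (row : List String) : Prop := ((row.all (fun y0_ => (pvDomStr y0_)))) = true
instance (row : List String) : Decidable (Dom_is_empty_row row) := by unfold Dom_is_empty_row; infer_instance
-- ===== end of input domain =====

-- B: instead of stripping each cell with an early exit, join all cells into one string and strip once (idiomatic one-liner).


-- ===== PORT A =====
-- the 'for cell in row' loop with its early 'return False' (the 'cell is None' branch cannot fire for List String)
def pvLoopA : List String → Bool
  | [] => true
  | cell :: rest => if PySem.Str.strip cell ≠ "" then false else pvLoopA rest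

def is_empty_row (row : List String) : Bool :=
  if row = [] then true else pvLoopA row

-- ===== PORT B =====
def is_empty_row_alt (row : List String) : Bool :=
  PySem.Str.strip (PySem.Str.join "" row) == ""

-- ===== PRECONDITION & SPEC =====
def Spec_is_empty_row (row : List String) (out : Bool) : Prop := out = is_empty_row_alt row
instance (row : List String) (out : Bool) : Decidable (Spec_is_empty_row row out) := by unfold Spec_is_empty_row; infer_instance

-- ===== CLAIM (what is proved, stated in full; the proofs are below) =====
def Claim_equal_is_empty_row : Prop := ∀ (row : List String), Dom_is_empty_row row → Spec_is_empty_row row (is_empty_row row)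

-- ===== LEMMAS AND PROOFS =====

theorem toList_eq_nil_iff (s : String) : s.toList = [] ↔ s = "" := by
  constructor
  · intro h; cases s with | _ d => simp_all
  · intro h; simp [h]

theorem strip_eq_nil_iff (cs : List Char) :
    PySem.Chars.strip cs = [] ↔ ∀ c ∈ cs, PySem.Chars.isspace c = true := by
  unfold PySem.Chars.strip PySem.Chars.rstrip PySem.Chars.lstrip
  rw [List.reverse_eq_nil_iff, List.dropWhile_eq_nil_iff]
  constructor
  · intro h c hc
    by_cases hmem : c ∈ List.dropWhile PySem.Chars.isspace cs
    · exact h c (List.mem_reverse.mpr hmem)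
    · -- c is in the takeWhile prefix, where isspace holds
      have hsplit : c ∈ List.takeWhile PySem.Chars.isspace cs ++ List.dropWhile PySem.Chars.isspace cs := by
        rw [List.takeWhile_append_dropWhile]; exact hc
      rcases List.mem_append.mp hsplit with ht | hd
      · exact List.mem_takeWhile_imp ht
      · exact absurd hd hmem
  · intro h c hc
    exact h c (List.dropWhile_sublist _ |>.subset (List.mem_reverse.mp hc))

theorem strip_str_eq_empty_iff (s : String) :
    PySem.Str.strip s = "" ↔ ∀ c ∈ s.toList, PySem.Chars.isspace c = true := by
  rw [← toList_eq_nil_iff, PySem.Str.toList_strip, strip_eq_nil_iff]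

theorem join_empty_toList (row : List String) :
    (PySem.Str.join "" row).toList = (row.map String.toList).flatten := by
  rw [PySem.Str.toList_join]
  show List.intercalate "".toList _ = _
  have : ("" : String).toList = [] := rfl
  rw [this]
  unfold List.intercalate
  induction row with
  | nil => rfl
  | cons x xs ih =>
    cases xs with
    | nil => simp
    | cons y ys => simp_all

theorem loopA_true_iff (row : List String) :
    pvLoopA row = true ↔ ∀ s ∈ row, PySem.Str.strip s = "" := by
  induction row with
  | nil => simp [pvLoopA]
  | cons x xs ih =>
    unfold pvLoopA
    by_cases h : PySem.Str.strip x = "" <;> simp_all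

theorem is_empty_row_spec : Claim_equal_is_empty_row := by
  unfold Claim_equal_is_empty_row
  intro row _
  unfold Spec_is_empty_row is_empty_row is_empty_row_alt
  have halt : (PySem.Str.strip (PySem.Str.join "" row) == "") = true ↔
      ∀ s ∈ row, PySem.Str.strip s = "" := by
    rw [beq_iff_eq, ← toList_eq_nil_iff, PySem.Str.toList_strip, strip_eq_nil_iff]
    constructor
    · intro h s hs
      rw [strip_str_eq_empty_iff]
      intro c hc
      exact h c (by rw [join_empty_toList]; exact List.mem_flatten.mpr ⟨s.toList, List.mem_map_of_mem hs, hc⟩)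
    · intro h c hc
      rw [join_empty_toList] at hc
      rcases List.mem_flatten.mp hc with ⟨cs, hcs, hcmem⟩
      rcases List.mem_map.mp hcs with ⟨s, hs, rfl⟩
      exact (strip_str_eq_empty_iff s).mp (h s hs) c hcmem
  have hif : (if row = [] then true else pvLoopA row) = pvLoopA row := by
    split_ifs with hnil
    · subst hnil; rfl
    · rfl
  rw [hif, Bool.eq_iff_iff, loopA_true_iff, halt]
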